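-- pv_equiv track=rewrite | github.com/limajona/SocialMediaNetwork | SocialMediaNetwork.py | calc_similarity_scores
-- ===== SOURCE A (Python) =====
-- def num_in_common_between_lists(list1, list2):
--     '''
--     Takes 2 lists as parameters. It will iterate through every number of the list of lists, and will see how many common
--     friends both these users have.
--     Returns common number
--     '''
--     common_num = 0
--     for item in list1:  # iterate through every item in list
--         if item in list2:  # iterate through every number in every item in the list
--             common_num += 1
--     return common_num
--
-- def calc_similarity_scores(network):
--     '''
--     Will take network as a parameter. First will create a list of lists, with one list for each user. Then it will use
--     the function num_in_common_between_lists(list1, list2), to compare every user's friends and create a list of lists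
--     and each of the lists are for one user and the amount of common friends he/she shares with all the other users.
--     Returns the list with the similarity scores
--     '''
--     list_similarity = []  # initializing empty list for the similarity scores
--     for item in network:
--         user_list = []
--         list_similarity.append(user_list)  # will append n empty lists into similarity list, n is number of users.
--
--     for i in range(len(network)):  # iterate through lists in the similarity list
--         for n in range(len(network)):  # iterate through numbers in the lists in the similarity list
--             list1 = network[i]  # will set list1 as the first loop counter
--             list2 = network[n]  # will set list2 as the second loop counter
--             x = num_in_common_between_lists(list1, list2)  # use function to compare both lists and return an integer
--             list_similarity[i].append(x)
--     return list_similarity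
-- ===== SOURCE B (Python) =====
-- def calc_similarity_scores(network):
--     # Inverted index: friend value -> ordered list of user indices whose list contains it.
--     index = {}
--     for n, friends in enumerate(network):
--         for f in friends:
--             lst = index.setdefault(f, [])
--             if not lst or lst[-1] != n:
--                 lst.append(n)
--     size = len(network)
--     matrix = [[0] * size for _ in range(size)]
--     # Scatter: each occurrence of f in user i's list adds 1 to matrix[i][n] for every n owning f.
--     for i, friends in enumerate(network):
--         for f in friends:
--             for n in index.get(f, []):
--                 matrix[i][n] += 1
--     return matrix
-- ===== Notes on version B (the rewrite author's own statement) =====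
-- stated objective: faster
-- what changed: Replaces the all-pairs membership scans with an inverted index from friend value to owning user indices plus a single scatter pass over each user's list incrementing a preallocated zero matrix.
import Mathlib
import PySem

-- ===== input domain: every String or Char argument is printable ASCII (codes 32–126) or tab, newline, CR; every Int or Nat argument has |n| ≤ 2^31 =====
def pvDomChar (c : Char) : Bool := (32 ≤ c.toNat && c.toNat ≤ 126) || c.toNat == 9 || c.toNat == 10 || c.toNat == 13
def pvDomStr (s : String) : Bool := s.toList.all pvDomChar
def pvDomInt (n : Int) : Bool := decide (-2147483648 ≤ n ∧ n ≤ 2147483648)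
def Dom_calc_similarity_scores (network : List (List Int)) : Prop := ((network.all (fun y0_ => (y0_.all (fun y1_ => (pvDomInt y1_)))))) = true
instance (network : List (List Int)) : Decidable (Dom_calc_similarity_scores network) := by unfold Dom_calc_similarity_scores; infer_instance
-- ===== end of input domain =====

-- B replaces A's all-pairs membership counting by an inverted index (friend value → owner rows)
-- plus one scatter pass over each user's list into a preallocated zero matrix (objective: faster).

-- ===== PORT A =====
def num_in_common_between_lists (list1 list2 : List Int) : Int :=
  list1.foldl (fun common_num item => if item ∈ list2 then common_num + 1 else common_num) 0

def calc_similarity_scores (network : List (List Int)) : List (List Int) :=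
  let list_similarity : List (List Int) := network.foldl (fun acc _ => acc ++ [[]]) []
  (PySem.List.pyRange 0 (network.length : Int) 1).foldl (fun ls i =>
    (PySem.List.pyRange 0 (network.length : Int) 1).foldl (fun ls n =>
      let list1 := PySem.List.pyGetD network i []
      let list2 := PySem.List.pyGetD network n []
      let x := num_in_common_between_lists list1 list2
      ls.modify i.toNat (fun r => r ++ [x])) ls) list_similarity

-- ===== PORT B =====
-- inverted index: friend value ↦ ordered list of user indices whose friend list contains it
def pvBuildIndex (network : List (List Int)) : PySem.Dict Int (List Int) :=
  (PySem.List.enumerate network 0).foldl (fun index p =>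
    p.2.foldl (fun index f =>
      let lst := index.getD f []
      if lst = [] ∨ lst.getLast? ≠ some p.1 then index.insert f (lst ++ [p.1]) else index) index)
    PySem.Dict.empty

def calc_similarity_scores_alt (network : List (List Int)) : List (List Int) :=
  let index := pvBuildIndex network
  let size := network.length
  let matrix : List (List Int) := (List.range size).map (fun _ => List.replicate size (0 : Int))
  (PySem.List.enumerate network 0).foldl (fun matrix p =>
    p.2.foldl (fun matrix f =>
      (index.getD f []).foldl (fun matrix n =>
        matrix.modify p.1.toNat (fun row => row.modify n.toNat (fun v => v + 1))) matrix) matrix) matrix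

-- ===== PRECONDITION & SPEC =====
def Spec_calc_similarity_scores (network : List (List Int)) (out : List (List Int)) : Prop := out = calc_similarity_scores_alt network
instance (network : List (List Int)) (out : List (List Int)) : Decidable (Spec_calc_similarity_scores network out) := by unfold Spec_calc_similarity_scores; infer_instance

-- ===== CLAIM (what is proved, stated in full; the proofs are below) =====
def Claim_equal_calc_similarity_scores : Prop := ∀ (network : List (List Int)), Dom_calc_similarity_scores network → Spec_calc_similarity_scores network (calc_similarity_scores network)

-- ===== LEMMAS AND PROOFS =====

-- two modifications of the same position compose
theorem pv_modify_modify {α : Type} (l : List α) (i : Nat) (f g : α → α) :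
    (l.modify i f).modify i g = l.modify i (fun x => g (f x)) := by
  induction l generalizing i with
  | nil => simp
  | cons x t ih =>
    cases i with
    | zero => simp [List.modify_zero_cons]
    | succ j => simp [List.modify_succ_cons, ih]

-- a fold whose every step modifies the same position fuses into one modification
theorem pv_fuse {α β : Type} (ns : List β) (ls : List α) (i : Nat) (F : β → α → α) :
    ns.foldl (fun ls n => ls.modify i (F n)) ls
      = ls.modify i (fun r => ns.foldl (fun r n => F n r) r) := by
  induction ns generalizing ls with
  | nil => exact (List.modify_id i ls).symm ▸ rfl
  | cons n ns ih =>
    simp only [List.foldl_cons]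
    rw [ih, pv_modify_modify]

-- modification at the junction of an append
theorem pv_modify_append {α : Type} (pre : List α) (x : α) (t : List α) (f : α → α) :
    (pre ++ x :: t).modify pre.length f = pre ++ f x :: t := by
  induction pre with
  | nil => simp [List.modify_zero_cons]
  | cons y ys ih => simp [List.modify_succ_cons, ih]

-- A's outer loop: each range index rewrites its own row of the replicate-initialised matrix
theorem pv_fold_rows_py {α : Type} (m : Nat) :
    ∀ (s : Nat) (done : List (List α)) (r0 : List α) (T : Int → List α → List α),
    done.length = s →
    (PySem.List.pyRange (s : Int) ((s + m : Nat) : Int) 1).foldl (fun ls i => ls.modify i.toNat (T i))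
        (done ++ List.replicate m r0)
      = done ++ (PySem.List.pyRange (s : Int) ((s + m : Nat) : Int) 1).map (fun i => T i r0) := by
  induction m with
  | zero =>
    intro s done r0 T _
    rw [PySem.List.pyRange_one_eq_nil (by push_cast; omega)]
    simp
  | succ m ih =>
    intro s done r0 T hlen
    rw [PySem.List.pyRange_one_cons (by push_cast; omega)]
    simp only [List.foldl_cons, List.replicate_succ, List.map_cons, Int.toNat_natCast]
    rw [← hlen, pv_modify_append]
    have e1 : done ++ T (done.length : Int) r0 :: List.replicate m r0
        = (done ++ [T (done.length : Int) r0]) ++ List.replicate m r0 := by simp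
    have e3 : ((s + (m + 1) : Nat) : Int) = (((s + 1) + m : Nat) : Int) := by push_cast; ring
    have e2' : ((s : Int) + 1) = ((s + 1 : Nat) : Int) := by push_cast; ring
    rw [e1, hlen, e3, e2', ih (s + 1) (done ++ [T (s : Int) r0]) r0 T (by simp [hlen])]
    simp

-- B's outer loop: each enumerated user rewrites its own row of the replicate-initialised matrix
theorem pv_fold_rows_enum {α γ : Type} (xs : List γ) :
    ∀ (s : Nat) (done : List (List α)) (r0 : List α) (T : γ → List α → List α),
    done.length = s →
    (PySem.List.enumerate xs (s : Int)).foldl (fun ls p => ls.modify p.1.toNat (T p.2))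
        (done ++ List.replicate xs.length r0)
      = done ++ xs.map (fun c => T c r0) := by
  induction xs with
  | nil => intro s done r0 T _; simp [PySem.List.enumerate_nil]
  | cons x t ih =>
    intro s done r0 T hlen
    rw [PySem.List.enumerate_cons]
    simp only [List.foldl_cons, List.length_cons, List.replicate_succ, Int.toNat_natCast]
    rw [← hlen, pv_modify_append]
    have e1 : done ++ T x r0 :: List.replicate t.length r0
        = (done ++ [T x r0]) ++ List.replicate t.length r0 := by simp
    have e2 : ((done.length : Int) + 1) = ((done.length + 1 : Nat) : Int) := by push_cast; ring
    rw [e1, e2, ih (done.length + 1) (done ++ [T x r0]) r0 T (by simp)]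
    simp

-- A reduces to the matrix of pairwise common-friend counts
theorem pv_A_eq (network : List (List Int)) :
    calc_similarity_scores network
      = network.map (fun fi => network.map (fun fn => num_in_common_between_lists fi fn)) := by
  simp only [calc_similarity_scores]
  have hinit : network.foldl (fun acc _ => acc ++ [([] : List Int)]) []
      = List.replicate network.length ([] : List Int) := by
    rw [PySem.List.foldl_append_singleton_eq_map (fun _ : List Int => ([] : List Int)) network ([] : List (List Int))]
    simp [List.map_const']
  rw [hinit]
  have hrow : ∀ i : Int,
      (PySem.List.pyRange 0 (network.length : Int) 1).map
          (fun n => num_in_common_between_lists (PySem.List.pyGetD network i [])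
            (PySem.List.pyGetD network n []))
        = network.map (fun fn => num_in_common_between_lists (PySem.List.pyGetD network i []) fn) := by
    intro i
    rw [show (fun n => num_in_common_between_lists (PySem.List.pyGetD network i [])
          (PySem.List.pyGetD network n []))
        = (fun fn => num_in_common_between_lists (PySem.List.pyGetD network i []) fn)
            ∘ (fun n => PySem.List.pyGetD network n ([] : List Int)) from rfl]
    rw [← List.map_map, PySem.List.map_pyGetD_pyRange_zero']
  have hstep : ∀ (ls : List (List Int)) (i : Int), i ∈ PySem.List.pyRange 0 (network.length : Int) 1 →
      (PySem.List.pyRange 0 (network.length : Int) 1).foldl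
          (fun ls n => ls.modify i.toNat (fun r =>
            r ++ [num_in_common_between_lists (PySem.List.pyGetD network i [])
              (PySem.List.pyGetD network n [])])) ls
        = ls.modify i.toNat (fun r =>
            r ++ network.map (fun fn => num_in_common_between_lists (PySem.List.pyGetD network i []) fn)) := by
    intro ls i _
    rw [pv_fuse]
    congr 1
    funext r
    rw [PySem.List.foldl_append_singleton_eq_map, hrow i]
  refine Eq.trans (PySem.List.foldl_congr_mem _ _ _ _ hstep) ?_
  have hfold := pv_fold_rows_py (α := Int) network.length 0 []
    ([] : List Int)
    (fun i r => r ++ network.map (fun fn => num_in_common_between_lists (PySem.List.pyGetD network i []) fn))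
    rfl
  simp only [Nat.cast_zero, Nat.zero_add, List.nil_append] at hfold
  rw [hfold]
  rw [show (fun (i : Int) => network.map (fun fn => num_in_common_between_lists (PySem.List.pyGetD network i []) fn))
      = (fun fi => network.map (fun fn => num_in_common_between_lists fi fn))
          ∘ (fun i => PySem.List.pyGetD network i ([] : List Int)) from rfl]
  rw [← List.map_map, PySem.List.map_pyGetD_pyRange_zero']

-- B reduces to a per-row scatter over each user's friend list
theorem pv_B_eq (network : List (List Int)) :
    calc_similarity_scores_alt network
      = network.map (fun friends => friends.foldl (fun r f =>
          ((pvBuildIndex network).getD f []).foldl (fun r n => r.modify n.toNat (fun v => v + 1)) r)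
          (List.replicate network.length (0 : Int))) := by
  simp only [calc_similarity_scores_alt]
  have hinit : (List.range network.length).map (fun _ => List.replicate network.length (0 : Int))
      = List.replicate network.length (List.replicate network.length (0 : Int)) := by
    simp [List.map_const']
  rw [hinit]
  have hstep : ∀ (m : List (List Int)) (p : Int × List Int), p ∈ PySem.List.enumerate network 0 →
      p.2.foldl (fun m f =>
          ((pvBuildIndex network).getD f []).foldl (fun m n =>
            m.modify p.1.toNat (fun row => row.modify n.toNat (fun v => v + 1))) m) m
        = m.modify p.1.toNat (fun r => p.2.foldl (fun r f =>
            ((pvBuildIndex network).getD f []).foldl (fun r n => r.modify n.toNat (fun v => v + 1)) r) r) := by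
    intro m p _
    have hstep2 : ∀ (m : List (List Int)) (f : Int), f ∈ p.2 →
        ((pvBuildIndex network).getD f []).foldl (fun m n =>
            m.modify p.1.toNat (fun row => row.modify n.toNat (fun v => v + 1))) m
          = m.modify p.1.toNat (fun r =>
              ((pvBuildIndex network).getD f []).foldl (fun r n => r.modify n.toNat (fun v => v + 1)) r) := by
      intro m f _
      exact pv_fuse _ _ _ _
    exact Eq.trans (PySem.List.foldl_congr_mem _ _ _ _ hstep2) (pv_fuse _ _ _ _)
  refine Eq.trans (PySem.List.foldl_congr_mem _ _ _ _ hstep) ?_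
  have hfold := pv_fold_rows_enum (α := Int) network 0 []
    (List.replicate network.length (0 : Int))
    (fun friends r => friends.foldl (fun r f =>
        ((pvBuildIndex network).getD f []).foldl (fun r n => r.modify n.toNat (fun v => v + 1)) r) r)
    rfl
  simp only [Nat.cast_zero, List.nil_append] at hfold
  exact hfold

-- inner index-building loop over one user's friend list: appends row index k once per new value
theorem pv_inner (rest : List Int) :
    ∀ (k : Int) (d0 d : PySem.Dict Int (List Int)) (mark : Int → Bool),
    (∀ f n, n ∈ d0.getD f [] → n < k) →
    (∀ f, d.getD f [] = d0.getD f [] ++ (if mark f then [k] else [])) →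
    ∀ f, (rest.foldl (fun index f =>
        let lst := index.getD f []
        if lst = [] ∨ lst.getLast? ≠ some k then index.insert f (lst ++ [k]) else index) d).getD f []
      = d0.getD f [] ++ (if (mark f || decide (f ∈ rest)) then [k] else []) := by
  induction rest with
  | nil => intro k d0 d mark hb hd f; simpa using hd f
  | cons f0 rest ih =>
    intro k d0 d mark hb hd f
    simp only [List.foldl_cons]
    by_cases hm : mark f0 = true
    · have hl : d.getD f0 [] = d0.getD f0 [] ++ [k] := by rw [hd f0]; simp [hm]
      have hcond : ¬(d.getD f0 [] = [] ∨ (d.getD f0 []).getLast? ≠ some k) := by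
        rw [hl]; simp
      rw [if_neg hcond]
      rw [ih k d0 d mark hb hd f]
      by_cases hf : f = f0
      · subst hf; simp [hm]
      · simp [List.mem_cons, hf]
    · have hl : d.getD f0 [] = d0.getD f0 [] := by rw [hd f0]; simp [hm]
      have hcond : (d.getD f0 [] = [] ∨ (d.getD f0 []).getLast? ≠ some k) := by
        rw [hl]
        rcases heq : d0.getD f0 [] with _ | _
        · exact Or.inl rfl
        · right
          intro hlast
          have hmem : k ∈ d0.getD f0 [] := by
            have := List.mem_of_getLast? hlast
            rwa [heq]
          exact absurd (hb f0 k hmem) (lt_irrefl k)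
      rw [if_pos hcond]
      have hd' : ∀ f, ((d.insert f0 (d.getD f0 [] ++ [k])).getD f [])
          = d0.getD f [] ++ (if ((f == f0) || mark f) then [k] else []) := by
        intro f
        by_cases hf : f = f0
        · subst hf
          rw [PySem.Dict.getD_insert_self, hl]
          simp
        · rw [PySem.Dict.getD_insert_of_ne _ _ _ hf, hd f]
          simp [hf]
      rw [ih k d0 _ (fun f => (f == f0) || mark f) hb hd' f]
      by_cases hf : f = f0
      · subst hf; simp
      · simp [List.mem_cons, hf]

-- outer index-building loop: the dict maps f to the ascending indices of the rows containing f
theorem pv_outer (xs : List (List Int)) :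
    ∀ (s : Nat) (d : PySem.Dict Int (List Int)),
    (∀ f n, n ∈ d.getD f [] → n < (s : Int)) →
    ∀ f, ((PySem.List.enumerate xs (s : Int)).foldl (fun index p =>
        p.2.foldl (fun index f =>
          let lst := index.getD f []
          if lst = [] ∨ lst.getLast? ≠ some p.1 then index.insert f (lst ++ [p.1]) else index) index) d).getD f []
      = d.getD f [] ++ ((PySem.List.enumerate xs (s : Int)).filter (fun p => decide (f ∈ p.2))).map (·.1) := by
  induction xs with
  | nil => intro s d hb f; simp [PySem.List.enumerate_nil]
  | cons x t ih =>
    intro s d hb f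
    rw [PySem.List.enumerate_cons]
    simp only [List.foldl_cons, List.filter_cons]
    have hchar := pv_inner x (s : Int) d d (fun _ => false) (hb) (fun f => by simp)
    have hb1 : ∀ f n, n ∈ ((x.foldl (fun index f =>
        let lst := index.getD f []
        if lst = [] ∨ lst.getLast? ≠ some (s : Int) then index.insert f (lst ++ [(s : Int)]) else index) d).getD f []) → n < ((s : Int) + 1) := by
      intro f n hn
      rw [hchar f] at hn
      rcases List.mem_append.mp hn with h | h
      · exact lt_trans (hb f n h) (by omega)
      · by_cases hx : f ∈ x
        · simp [hx] at h; omega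
        · simp [hx] at h
    have ecast : ((s : Int) + 1) = ((s + 1 : Nat) : Int) := by push_cast; ring
    rw [ecast] at hb1 ⊢
    rw [ih (s + 1) _ hb1 f, hchar f]
    by_cases hx : f ∈ x
    · simp [hx, List.append_assoc]
    · simp [hx]

-- the finished inverted index, characterised
theorem pv_idx_char (network : List (List Int)) (f : Int) :
    (pvBuildIndex network).getD f []
      = ((PySem.List.enumerate network 0).filter (fun p => decide (f ∈ p.2))).map (·.1) := by
  have h := pv_outer network 0 PySem.Dict.empty
    (by intro f n hn; simp [PySem.Dict.getD_empty] at hn) f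
  simpa [pvBuildIndex, PySem.Dict.getD_empty] using h

-- A's helper counts the members of list1 that occur in list2
theorem pv_numc (l1 l2 : List Int) :
    num_in_common_between_lists l1 l2 = (l1.countP (fun x => decide (x ∈ l2)) : Int) := by
  have h := PySem.List.foldl_count_if (fun x => decide (x ∈ l2)) l1 (0 : Int)
  simp only [decide_eq_true_eq] at h
  simpa [num_in_common_between_lists] using h

-- counting occurrences of absolute row index s+k among the owners of f
theorem pv_cnt_enum (xs : List (List Int)) :
    ∀ (s k : Nat) (f : Int),
    ((PySem.List.enumerate xs (s : Int)).countP (fun p => decide (p.1.toNat = s + k) && decide (f ∈ p.2)))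
      = if h : k < xs.length then (if f ∈ xs[k] then 1 else 0) else 0 := by
  induction xs with
  | nil => intro s k f; simp [PySem.List.enumerate_nil]
  | cons x t ih =>
    intro s k f
    rw [PySem.List.enumerate_cons, List.countP_cons]
    cases k with
    | zero =>
      have htail : (PySem.List.enumerate t ((s : Int) + 1)).countP
          (fun p => decide (p.1.toNat = s + 0) && decide (f ∈ p.2)) = 0 := by
        rw [List.countP_eq_zero]
        intro p hp
        rcases (PySem.List.mem_enumerate_iff ..).mp hp with ⟨j, hj, rfl⟩
        simp only [Bool.and_eq_true, decide_eq_true_eq]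
        rintro ⟨h1, -⟩
        omega
      rw [htail]
      simp [Int.toNat_natCast]
    | succ k =>
      have ecast : ((s : Int) + 1) = ((s + 1 : Nat) : Int) := by push_cast; ring
      have eidx : s + (k + 1) = (s + 1) + k := by omega
      rw [ecast, eidx, ih (s + 1) k f]
      have hh : (decide (((s : Nat) : Int).toNat = (s + 1) + k) && decide (f ∈ x)) = false := by
        simp only [Int.toNat_natCast, Bool.and_eq_false_iff, decide_eq_false_iff_not]
        left; omega
      rw [hh]
      simp only [Nat.succ_lt_succ_iff, List.length_cons, List.getElem_cons_succ,
        Bool.false_eq_true, if_false, add_zero]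
      rfl

-- incrementing at the positions listed in ns adds the multiplicity of slot k
theorem pv_incr_get (ns : List Int) :
    ∀ (r : List Int) (k : Nat),
    (ns.foldl (fun r n => r.modify n.toNat (fun v => v + 1)) r)[k]?
      = r[k]?.map (fun v => v + (ns.countP (fun n => decide (n.toNat = k)) : Int)) := by
  induction ns with
  | nil => intro r k; simp
  | cons n0 t ih =>
    intro r k
    simp only [List.foldl_cons]
    rw [ih, List.getElem?_modify, List.countP_cons]
    by_cases h : n0.toNat = k
    · cases r[k]? <;> simp [h] <;> ring
    · cases r[k]? <;> simp [h]

-- the whole per-user scatter, slot by slot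
theorem pv_row_get (I : Int → List Int) (fi : List Int) :
    ∀ (r : List Int) (k : Nat),
    (fi.foldl (fun r f => (I f).foldl (fun r n => r.modify n.toNat (fun v => v + 1)) r) r)[k]?
      = r[k]?.map (fun v => v + (fi.map (fun f => ((I f).countP (fun n => decide (n.toNat = k)) : Int))).sum) := by
  induction fi with
  | nil => intro r k; simp
  | cons f0 t ih =>
    intro r k
    simp only [List.foldl_cons, List.map_cons, List.sum_cons]
    rw [ih, pv_incr_get]
    cases r[k]? <;> simp <;> ring

-- one row of A equals the corresponding scattered row of B
theorem pv_row_eq (network : List (List Int)) (fi : List Int) :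
    network.map (fun fn => num_in_common_between_lists fi fn)
      = fi.foldl (fun r f =>
          ((pvBuildIndex network).getD f []).foldl (fun r n => r.modify n.toNat (fun v => v + 1)) r)
          (List.replicate network.length (0 : Int)) := by
  apply List.ext_getElem?
  intro k
  rw [pv_row_get, List.getElem?_map, List.getElem?_replicate]
  by_cases hk : k < network.length
  · have hcnt : ∀ f : Int, (((pvBuildIndex network).getD f []).countP (fun n => decide (n.toNat = k)) : Nat)
        = if f ∈ network[k] then 1 else 0 := by
      intro f
      rw [pv_idx_char, List.countP_map, List.countP_filter]
      rw [show ((fun n => decide (n.toNat = k)) ∘ (fun p : Int × List Int => p.1))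
          = (fun p : Int × List Int => decide (p.1.toNat = k)) from rfl]
      rw [show (fun (p : Int × List Int) => decide (p.1.toNat = k) && decide (f ∈ p.2))
          = (fun (p : Int × List Int) => decide (p.1.toNat = 0 + k) && decide (f ∈ p.2)) from by
        funext p; rw [Nat.zero_add]]
      have h0 := pv_cnt_enum network 0 k f
      rw [show ((0 : Nat) : Int) = (0 : Int) from rfl] at h0
      rw [h0, dif_pos hk]
    rw [if_pos hk, List.getElem?_eq_getElem hk]
    simp only [Option.map_some]
    congr 1
    rw [pv_numc]
    have hsum : (fi.map (fun f => (((pvBuildIndex network).getD f []).countP (fun n => decide (n.toNat = k)) : Int))).sum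
        = (fi.map (fun f => if f ∈ network[k] then (1 : Int) else 0)).sum := by
      congr 1
      apply List.map_congr_left
      intro f _
      rw [hcnt f]
      push_cast
      by_cases hm : f ∈ network[k] <;> simp [hm]
    rw [hsum, PySem.List.sum_map_ite_one_zero' (Membership.mem network[k]) fi]
    ring
  · rw [if_neg hk, List.getElem?_eq_none (by omega)]
    rfl

-- ===== VERDICT (by name: the statement is the Claim_ definition above) =====
theorem calc_similarity_scores_spec : Claim_equal_calc_similarity_scores := by
  intro network _
  unfold Spec_calc_similarity_scores
  rw [pv_A_eq, pv_B_eq]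
  exact List.map_congr_left (fun fi _ => pv_row_eq network fi)
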